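-- pv_equiv track=rewrite | github.com/QuanHoangNgoc/Greedy-Algorithms-Strategy-Codework-and-Cheetsheet- | OnePiece/p.py | check
-- ===== SOURCE A (Python) =====
-- def check(P: int, a: list, b: list, numK: int) -> bool:
--     v = []
--     for i in range(len(a)):
--         v += [b[i] - a[i] * P]
--
--     v = sorted(v)
--     v = v[::-1]
--
--     sum = 0
--     for i in range(min(numK, len(v))):
--         sum += v[i]
--
--     return sum >= 0
-- ===== SOURCE B (Python) =====
-- def _topk_sum(v, k):
--     # sum of the k largest elements of v, for 1 <= k; quickselect-style partition
--     if k >= len(v):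
--         return sum(v)
--     pivot = v[len(v) // 2]
--     hi = [x for x in v if x > pivot]
--     if k <= len(hi):
--         return _topk_sum(hi, k)
--     eq = [x for x in v if x == pivot]
--     if k <= len(hi) + len(eq):
--         return sum(hi) + pivot * (k - len(hi))
--     lo = [x for x in v if x < pivot]
--     return sum(hi) + sum(eq) + _topk_sum(lo, k - len(hi) - len(eq))
--
--
-- def check(P: int, a: list, b: list, numK: int) -> bool:
--     v = [bi - ai * P for ai, bi in zip(a, b)]
--     k = min(numK, len(v))
--     if k <= 0:
--         return True
--     return _topk_sum(v, k) >= 0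
-- ===== Notes on version B (the rewrite author's own statement) =====
-- stated objective: faster
-- what changed: replaces sort+reverse+prefix-loop by a quickselect-style three-way-partition recursion that sums the k largest values without sorting
import Mathlib
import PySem

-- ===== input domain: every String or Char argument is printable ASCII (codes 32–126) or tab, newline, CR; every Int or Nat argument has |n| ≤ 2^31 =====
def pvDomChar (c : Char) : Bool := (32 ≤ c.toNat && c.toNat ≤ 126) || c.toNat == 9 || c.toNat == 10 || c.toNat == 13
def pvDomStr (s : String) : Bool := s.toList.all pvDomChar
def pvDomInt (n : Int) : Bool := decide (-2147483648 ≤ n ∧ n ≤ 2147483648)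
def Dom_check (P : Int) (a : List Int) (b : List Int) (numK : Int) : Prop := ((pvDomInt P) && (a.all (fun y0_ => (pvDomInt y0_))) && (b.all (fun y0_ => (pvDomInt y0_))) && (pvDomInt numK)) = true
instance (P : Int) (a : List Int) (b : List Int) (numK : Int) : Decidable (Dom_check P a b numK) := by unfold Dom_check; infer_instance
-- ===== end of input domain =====

-- B replaces A's sort+reverse+prefix loop by a quickselect-style three-way partition
-- that sums the k largest values without sorting (objective: faster).

-- ===== PORT A =====
def check (P : Int) (a : List Int) (b : List Int) (numK : Int) : Bool :=
  -- v = []; for i in range(len(a)): v += [b[i] - a[i] * P]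
  let v := (PySem.List.pyRange 0 (a.length : Int) 1).foldl
      (fun acc i => acc ++ [PySem.List.pyGetD b i 0 - PySem.List.pyGetD a i 0 * P]) []
  -- v = sorted(v); v = v[::-1]
  let v2 := PySem.List.sorted v (fun x => x) false
  let v3 := (PySem.List.slice? v2 none none (-1)).getD []
  -- sum = 0; for i in range(min(numK, len(v))): sum += v[i]
  let s := (PySem.List.pyRange 0 (min numK (v3.length : Int)) 1).foldl
      (fun acc i => acc + PySem.List.pyGetD v3 i 0) 0
  decide (0 ≤ s)

-- ===== PORT B =====
-- _topk_sum(v, k): sum of the k largest elements of v, 1 <= k, by three-way partition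
def topkSum (v : List Int) (k : Int) : Int :=
  if (v.length : Int) ≤ k then v.sum
  else if h : v = [] then 0   -- unreachable guard (Python would raise here; never called so)
  else
    let pivot := v.getD (v.length / 2) 0   -- v[len(v)//2]: index is nonnegative and in range, so getD with Nat '/' is exact
    let hi := v.filter (fun x => decide (pivot < x))
    if k ≤ (hi.length : Int) then topkSum hi k
    else
      let eq := v.filter (fun x => decide (x = pivot))
      if k ≤ (hi.length : Int) + (eq.length : Int) then
        hi.sum + pivot * (k - hi.length)
      else
        let lo := v.filter (fun x => decide (x < pivot))
        hi.sum + eq.sum + topkSum lo (k - hi.length - eq.length)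
termination_by v.length
decreasing_by
  · have hm : v.getD (v.length / 2) 0 ∈ v := by
      rw [List.getD_eq_getElem _ _ (by
        have : v.length ≠ 0 := by simpa [List.length_eq_zero_iff] using h
        omega)]
      exact List.getElem_mem _
    simp only [List.length_unattach]
    refine lt_of_lt_of_le
      (List.length_filter_lt_length_iff_exists.2 ⟨⟨_, hm⟩, List.mem_attach _ _, by simp⟩)
      (by simp)
  · have hm : v.getD (v.length / 2) 0 ∈ v := by
      rw [List.getD_eq_getElem _ _ (by
        have : v.length ≠ 0 := by simpa [List.length_eq_zero_iff] using h
        omega)]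
      exact List.getElem_mem _
    simp only [List.length_unattach]
    refine lt_of_lt_of_le
      (List.length_filter_lt_length_iff_exists.2 ⟨⟨_, hm⟩, List.mem_attach _ _, by simp⟩)
      (by simp)

def check_alt (P : Int) (a : List Int) (b : List Int) (numK : Int) : Bool :=
  let v := (a.zip b).map (fun p => p.2 - p.1 * P)
  let k := min numK (v.length : Int)
  if k ≤ 0 then true
  else decide (0 ≤ topkSum v k)

-- ===== PRECONDITION & SPEC =====
-- A indexes b[i] for every i < len(a), so it raises IndexError when b is shorter than a;
-- exactly those inputs are excluded (B's zip would instead truncate to the common prefix).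
def Pre_check (P : Int) (a : List Int) (b : List Int) (numK : Int) : Prop :=
  a.length ≤ b.length
instance (P : Int) (a : List Int) (b : List Int) (numK : Int) : Decidable (Pre_check P a b numK) := by unfold Pre_check; infer_instance

def pvWitness_check : Int × List Int × List Int × Int := (2, [1, 3, 0], [5, -2, 4], 2)

def Spec_check (P : Int) (a : List Int) (b : List Int) (numK : Int) (out : Bool) : Prop := out = check_alt P a b numK
instance (P : Int) (a : List Int) (b : List Int) (numK : Int) (out : Bool) : Decidable (Spec_check P a b numK out) := by unfold Spec_check; infer_instance

-- ===== CLAIM (what is proved, stated in full; the proofs are below) =====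
def Claim_equal_check : Prop := ∀ (P : Int) (a : List Int) (b : List Int) (numK : Int), Dom_check P a b numK → Pre_check P a b numK → Spec_check P a b numK (check P a b numK)

-- ===== LEMMAS AND PROOFS =====

-- the descending sort A walks a prefix of
def descSorted (v : List Int) : List Int := (PySem.List.sorted v (fun x => x) false).reverse

lemma length_descSorted (v : List Int) : (descSorted v).length = v.length := by
  simp [descSorted, PySem.List.length_sorted]

lemma sum_descSorted (v : List Int) : (descSorted v).sum = v.sum := by
  simpa [descSorted] using (PySem.List.sorted_perm v (fun x => x) false).sum_eq

lemma pairwise_le_of_all_eq (l : List Int) (p : Int) (hall : ∀ x ∈ l, x = p) :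
    l.Pairwise (fun a b => a ≤ b) := by
  rw [List.eq_replicate_of_mem hall]
  exact List.pairwise_replicate.2 (Or.inr le_rfl)

lemma sum_take_of_all_eq (l : List Int) (p : Int) (m : Nat)
    (hall : ∀ x ∈ l, x = p) (hm : m ≤ l.length) : (l.take m).sum = m * p := by
  have hrep : l = List.replicate l.length p := List.eq_replicate_of_mem hall
  rw [hrep, List.take_replicate, List.sum_replicate]
  have : min m l.length = m := by omega
  rw [this]
  simp

lemma part_perm (v : List Int) (p : Int) :
    (v.filter (fun x => decide (x < p)) ++ v.filter (fun x => decide (x = p))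
      ++ v.filter (fun x => decide (p < x))).Perm v := by
  have h1 := List.filter_append_perm (fun x => decide (x < p)) v
  have h2 := List.filter_append_perm (fun x => decide (x = p)) (v.filter (fun x => !decide (x < p)))
  have e1 : (v.filter (fun x => !decide (x < p))).filter (fun x => decide (x = p))
      = v.filter (fun x => decide (x = p)) := by
    rw [List.filter_filter]
    apply List.filter_congr
    intro x _
    by_cases hx : x = p
    · simp [hx]
    · simp [hx]
  have e2 : (v.filter (fun x => !decide (x < p))).filter (fun x => !decide (x = p))
      = v.filter (fun x => decide (p < x)) := by
    rw [List.filter_filter]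
    apply List.filter_congr
    intro x _
    by_cases hx : p < x
    · simp [hx]; omega
    · simp [hx]; omega
  rw [e1, e2] at h2
  rw [List.append_assoc]
  exact (List.Perm.append_left _ h2).trans h1

lemma sorted_partition (v : List Int) (p : Int) :
    PySem.List.sorted v (fun x => x) false
      = PySem.List.sorted (v.filter (fun x => decide (x < p))) (fun x => x) false
        ++ v.filter (fun x => decide (x = p))
        ++ PySem.List.sorted (v.filter (fun x => decide (p < x))) (fun x => x) false := by
  apply PySem.List.sorted_id_eq_of_perm_of_pairwise
  · exact (((PySem.List.sorted_perm _ _ _).append (List.Perm.refl _)).append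
      (PySem.List.sorted_perm _ _ _)).trans (part_perm v p)
  · rw [List.append_assoc, List.pairwise_append]
    refine ⟨PySem.List.sorted_pairwise _ _, ?_, ?_⟩
    · rw [List.pairwise_append]
      refine ⟨pairwise_le_of_all_eq _ p (fun x hx => by simpa using (List.mem_filter.1 hx).2),
        PySem.List.sorted_pairwise _ _, ?_⟩
      intro x hx y hy
      have hxp : x = p := by simpa using (List.mem_filter.1 hx).2
      have hyp : p < y := by
        have := (PySem.List.mem_sorted _ _ _ _).1 hy
        simpa using (List.mem_filter.1 this).2
      omega
    · intro x hx y hy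
      have hxp : x < p := by
        have := (PySem.List.mem_sorted _ _ _ _).1 hx
        simpa using (List.mem_filter.1 this).2
      rcases List.mem_append.1 hy with hy | hy
      · have hyp : y = p := by simpa using (List.mem_filter.1 hy).2
        omega
      · have hyp : p < y := by
          have := (PySem.List.mem_sorted _ _ _ _).1 hy
          simpa using (List.mem_filter.1 this).2
        omega

lemma descSorted_partition (v : List Int) (p : Int) :
    descSorted v
      = descSorted (v.filter (fun x => decide (p < x)))
        ++ ((v.filter (fun x => decide (x = p))).reverse
          ++ descSorted (v.filter (fun x => decide (x < p)))) := by
  unfold descSorted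
  rw [sorted_partition v p]
  simp [List.reverse_append, List.append_assoc]

lemma topkSum_correct : ∀ (n : Nat) (v : List Int), v.length = n → ∀ k : Int, 0 < k →
    topkSum v k = ((descSorted v).take k.toNat).sum := by
  intro n
  induction n using Nat.strong_induction_on with
  | _ n IH =>
    intro v hn k hk
    rw [topkSum]
    split_ifs with h1 h2
    · rw [List.take_of_length_le (by rw [length_descSorted]; omega), sum_descSorted]
    · exfalso; apply h1; simp [h2]; omega
    dsimp only
    set p := v.getD (v.length / 2) 0 with hp
    set hi := v.filter (fun x => decide (p < x)) with hhi
    set eqs := v.filter (fun x => decide (x = p)) with heqs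
    set lo := v.filter (fun x => decide (x < p)) with hlo
    split_ifs with h3 h4
    · -- k ≤ len hi : recurse on hi
      have hlt : hi.length < n := by
        rw [← hn, hhi]
        have hm : p ∈ v := by
          rw [hp, List.getD_eq_getElem _ _ (by
            have : v.length ≠ 0 := by simpa [List.length_eq_zero_iff] using h2
            omega)]
          exact List.getElem_mem _
        exact List.length_filter_lt_length_iff_exists.2 ⟨p, hm, by simp⟩
      rw [IH hi.length hlt hi rfl k hk]
      rw [descSorted_partition v p, ← hhi, ← heqs, ← hlo]
      rw [List.take_append]
      have hz : k.toNat - (descSorted hi).length = 0 := by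
        rw [length_descSorted]; omega
      rw [hz]
      simp
    · -- len hi < k ≤ len hi + len eq
      rw [descSorted_partition v p, ← hhi, ← heqs, ← hlo]
      rw [List.take_append, List.take_append]
      have hA : (descSorted hi).length ≤ k.toNat := by rw [length_descSorted]; omega
      rw [List.take_of_length_le hA]
      have hz : k.toNat - (descSorted hi).length - eqs.reverse.length = 0 := by
        rw [length_descSorted, List.length_reverse]; omega
      rw [hz]
      rw [List.sum_append, List.sum_append, List.take_zero, List.sum_nil, add_zero]
      rw [sum_descSorted]
      rw [sum_take_of_all_eq eqs.reverse p (k.toNat - (descSorted hi).length)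
        (fun x hx => by
          have := (List.mem_filter.1 (List.mem_reverse.1 hx)).2
          simpa using this)
        (by rw [List.length_reverse, length_descSorted]; omega)]
      have hc : ((k.toNat - (descSorted hi).length : Nat) : Int) = k - hi.length := by
        have := length_descSorted hi
        omega
      rw [hc]
      ring
    · -- k > len hi + len eq : recurse on lo
      have hm : p ∈ v := by
        rw [hp, List.getD_eq_getElem _ _ (by
          have : v.length ≠ 0 := by simpa [List.length_eq_zero_iff] using h2
          omega)]
        exact List.getElem_mem _
      have hlt : lo.length < n := by
        rw [← hn, hlo]
        exact List.length_filter_lt_length_iff_exists.2 ⟨p, hm, by simp⟩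
      rw [IH lo.length hlt lo rfl (k - hi.length - eqs.length) (by omega)]
      rw [descSorted_partition v p, ← hhi, ← heqs, ← hlo]
      rw [List.take_append, List.take_append]
      have hA : (descSorted hi).length ≤ k.toNat := by rw [length_descSorted]; omega
      rw [List.take_of_length_le hA]
      have hB : eqs.reverse.length ≤ k.toNat - (descSorted hi).length := by
        rw [length_descSorted, List.length_reverse]; omega
      rw [List.take_of_length_le hB]
      rw [List.sum_append, List.sum_append]
      rw [sum_descSorted, List.sum_reverse]
      have hc : k.toNat - (descSorted hi).length - eqs.reverse.length
          = (k - ↑hi.length - ↑eqs.length).toNat := by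
        rw [length_descSorted, List.length_reverse]; omega
      rw [hc]
      ring

-- A's accumulation loop is the sum of the first n elements
lemma sum_prefix_loop (xs : List Int) : ∀ (n : Nat), n ≤ xs.length →
    (PySem.List.pyRange 0 (n : Int) 1).foldl (fun acc i => acc + PySem.List.pyGetD xs i 0) 0
      = (xs.take n).sum := by
  intro n
  induction n with
  | zero => intro _; simp [PySem.List.pyRange_one_eq_nil]
  | succ n ih =>
    intro hle
    have hcast : ((n + 1 : Nat) : Int) = (n : Int) + 1 := by push_cast; ring
    rw [hcast, PySem.List.pyRange_one_succ_right (by positivity)]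
    rw [List.foldl_append, ih (by omega)]
    simp only [List.foldl]
    rw [PySem.List.pyGetD_natCast]
    rw [List.getD_eq_getElem _ _ (by omega)]
    rw [List.sum_take_succ _ _ (by omega)]

-- A's build loop equals B's zip comprehension when b is long enough
lemma vlist_eq (P : Int) (a b : List Int) (h : a.length ≤ b.length) :
    (PySem.List.pyRange 0 (a.length : Int) 1).foldl
      (fun acc i => acc ++ [PySem.List.pyGetD b i 0 - PySem.List.pyGetD a i 0 * P]) []
      = (a.zip b).map (fun p => p.2 - p.1 * P) := by
  rw [PySem.List.foldl_append_singleton_eq_map]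
  simp only [List.nil_append]
  apply List.ext_getElem
  · simp [PySem.List.length_pyRange_one, List.length_zip]; omega
  · intro i h1 h2
    simp only [List.getElem_map, PySem.List.getElem_pyRange_one, List.getElem_zip]
    have hi : i < a.length := by
      simpa [PySem.List.length_pyRange_one] using h1
    have hzero : (0 : Int) + (i : Int) = (i : Int) := by ring
    rw [hzero, PySem.List.pyGetD_natCast, PySem.List.pyGetD_natCast,
      List.getD_eq_getElem _ _ (by omega), List.getD_eq_getElem _ _ hi]

-- ===== VERDICT (by name: the statement is the Claim_ definition above) =====
theorem check_spec : Claim_equal_check := by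
  intro P a b numK _ hpre
  simp only [Spec_check, check, check_alt]
  rw [vlist_eq P a b hpre]
  set v := (a.zip b).map (fun p => p.2 - p.1 * P) with hv
  simp only [PySem.List.slice?_none_none_neg_one, Option.getD_some]
  rw [show (PySem.List.sorted v (fun x => x) false).reverse = descSorted v from rfl]
  by_cases hk : min numK ((v.length : Int)) ≤ 0
  · rw [if_pos (by simpa [length_descSorted] using hk)]
    have : min numK ((descSorted v).length : Int) ≤ 0 := by
      simpa [length_descSorted] using hk
    rw [show PySem.List.pyRange 0 (min numK ((descSorted v).length : Int)) 1 = [] from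
      PySem.List.pyRange_one_eq_nil this]
    simp
  · rw [if_neg (by simpa [length_descSorted] using hk)]
    rw [not_le] at hk
    set m : Int := min numK (v.length : Int) with hm
    have hmlen : m ≤ (v.length : Int) := min_le_right _ _
    have hm0 : 0 < m := hk
    have h1 : min numK ((descSorted v).length : Int) = m := by
      simp [length_descSorted, hm]
    rw [h1]
    have h2 : m = ((m.toNat : Nat) : Int) := by omega
    rw [h2, sum_prefix_loop (descSorted v) m.toNat
      (by rw [length_descSorted]; omega)]
    rw [topkSum_correct v.length v rfl ((m.toNat : Int)) (by omega)]
    have h3 : (max m 0).toNat = m.toNat := by omega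
    simp [h3]
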